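-- pv_equiv track=rewrite | github.com/zhangwenxuanQAQ/ai-center | app/core/knowledgebase/rag/app/book.py | _split_by_chapters
-- ===== SOURCE A (Python) =====
-- def _split_by_chapters(sections):
--     """按章节标题分割内容"""
--     chapters = []
--     current_chapter = []
--
--     for text, is_heading in sections:
--         if is_heading and current_chapter:
--             chapters.append(current_chapter)
--             current_chapter = [text]
--         else:
--             current_chapter.append(text)
--
--     if current_chapter:
--         chapters.append(current_chapter)
--
--     return chapters
-- ===== SOURCE B (Python) =====
-- def _span(rest):
--     """Texts of the leading non-heading run, plus the remainder."""
--     if not rest or rest[0][1]: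
--         return [], rest
--     chunk, rem = _span(rest[1:])
--     return [rest[0][0]] + chunk, rem
--
--
-- def _split_by_chapters(sections):
--     if not sections:
--         return []
--     chunk, rem = _span(sections[1:])
--     return [[sections[0][0]] + chunk] + _split_by_chapters(rem)
-- ===== Notes on version B (the rewrite author's own statement) =====
-- stated objective: alternative
-- what changed: Replaces the accumulator loop (chapters/current_chapter state with a trailing flush) by direct recursion on the structure: each chapter is the first text plus the span of following non-heading texts, then recurse on the remainder.
import Mathlib
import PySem

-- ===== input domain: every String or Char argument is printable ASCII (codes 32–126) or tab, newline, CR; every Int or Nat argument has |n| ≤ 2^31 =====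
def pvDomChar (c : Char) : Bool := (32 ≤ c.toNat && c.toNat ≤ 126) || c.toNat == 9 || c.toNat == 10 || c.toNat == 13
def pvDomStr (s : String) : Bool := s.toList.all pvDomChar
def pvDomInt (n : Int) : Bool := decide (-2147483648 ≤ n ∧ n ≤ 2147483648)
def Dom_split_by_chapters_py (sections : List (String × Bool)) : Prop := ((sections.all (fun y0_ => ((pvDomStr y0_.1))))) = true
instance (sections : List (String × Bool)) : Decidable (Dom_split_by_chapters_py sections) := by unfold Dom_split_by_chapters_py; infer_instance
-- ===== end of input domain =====

-- B replaces A's accumulator loop (chapters/current_chapter with a trailing flush) by direct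
-- recursion: each chapter is the first text plus the span of following non-heading texts
-- (objective: alternative decomposition, same cost).


-- ===== PORT A =====
-- step of A's for-loop: state = (chapters, current_chapter)
def stepA (st : List (List String) × List String) (p : String × Bool) :
    List (List String) × List String :=
  if p.2 && !st.2.isEmpty then (st.1 ++ [st.2], [p.1]) else (st.1, st.2 ++ [p.1])

def split_by_chapters_py (sections : List (String × Bool)) : List (List String) :=
  let st := sections.foldl stepA ([], [])
  if st.2.isEmpty then st.1 else st.1 ++ [st.2]

-- ===== PORT B =====
-- _span: texts of the leading non-heading run, plus the remainder
def spanChunk : List (String × Bool) → List String × List (String × Bool)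
  | [] => ([], [])
  | p :: rest =>
    if p.2 then ([], p :: rest)
    else
      let (c, r) := spanChunk rest
      (p.1 :: c, r)

theorem spanChunk_snd_length (l : List (String × Bool)) : (spanChunk l).2.length ≤ l.length := by
  induction l with
  | nil => simp [spanChunk]
  | cons p rest ih =>
    simp only [spanChunk]
    split
    · simp
    · simpa using Nat.le_succ_of_le ih

def split_by_chapters_py_alt : List (String × Bool) → List (List String)
  | [] => []
  | p :: rest => (p.1 :: (spanChunk rest).1) :: split_by_chapters_py_alt (spanChunk rest).2
termination_by l => l.length
decreasing_by
  exact Nat.lt_succ_of_le (spanChunk_snd_length rest)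

-- ===== PRECONDITION & SPEC =====
def Spec_split_by_chapters_py (sections : List (String × Bool)) (out : List (List String)) : Prop := out = split_by_chapters_py_alt sections
instance (sections : List (String × Bool)) (out : List (List String)) : Decidable (Spec_split_by_chapters_py sections out) := by unfold Spec_split_by_chapters_py; infer_instance

-- ===== CLAIM (what is proved, stated in full; the proofs are below) =====
def Claim_equal_split_by_chapters_py : Prop := ∀ (sections : List (String × Bool)), Dom_split_by_chapters_py sections → Spec_split_by_chapters_py sections (split_by_chapters_py sections)

-- ===== LEMMAS AND PROOFS =====

-- A's trailing flush ("if current_chapter: chapters.append(current_chapter)")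
def finalizeA (st : List (List String) × List String) : List (List String) :=
  if st.2.isEmpty then st.1 else st.1 ++ [st.2]

theorem alt_nil : split_by_chapters_py_alt [] = [] := by
  unfold split_by_chapters_py_alt
  rfl

theorem alt_cons (p : String × Bool) (rest : List (String × Bool)) :
    split_by_chapters_py_alt (p :: rest)
      = (p.1 :: (spanChunk rest).1) :: split_by_chapters_py_alt (spanChunk rest).2 := by
  conv_lhs => rw [split_by_chapters_py_alt]

theorem stepA_true (chs : List (List String)) (c t : String) (cs : List String) :
    stepA (chs, c :: cs) (t, true) = (chs ++ [c :: cs], [t]) := by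
  simp [stepA]

theorem stepA_false (chs : List (List String)) (c t : String) (cs : List String) :
    stepA (chs, c :: cs) (t, false) = (chs, c :: (cs ++ [t])) := by
  simp [stepA]

-- loop invariant: running A's loop from a nonempty current chapter and flushing at the end
-- yields the accumulated chapters followed by B's span-based decomposition
theorem keyA (l : List (String × Bool)) : ∀ (chs : List (List String)) (c : String) (cs : List String),
    finalizeA (l.foldl stepA (chs, c :: cs))
      = chs ++ ((c :: (cs ++ (spanChunk l).1)) :: split_by_chapters_py_alt (spanChunk l).2) := by
  induction l with
  | nil => intro chs c cs; simp [finalizeA, spanChunk, alt_nil]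
  | cons p rest ih =>
    intro chs c cs
    obtain ⟨t, h⟩ := p
    cases h with
    | true =>
      rw [List.foldl_cons, stepA_true]
      have := ih (chs ++ [c :: cs]) t []
      simp only [List.nil_append] at this
      rw [this]
      simp [spanChunk, alt_cons]
    | false =>
      rw [List.foldl_cons, stepA_false, ih chs c (cs ++ [t])]
      simp [spanChunk]

-- ===== VERDICT (by name: the statement is the Claim_ definition above) =====
theorem split_by_chapters_py_spec : Claim_equal_split_by_chapters_py := by
  intro sections _
  unfold Spec_split_by_chapters_py
  cases sections with
  | nil => simp [split_by_chapters_py, alt_nil]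
  | cons p rest =>
    obtain ⟨t, h⟩ := p
    have step0 : stepA ([], []) (t, h) = ([], [t]) := by
      simp [stepA]
    have : split_by_chapters_py ((t, h) :: rest) = finalizeA (rest.foldl stepA ([], [t])) := by
      simp [split_by_chapters_py, finalizeA, step0]
    rw [this, keyA rest [] t [], alt_cons]
    simp
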